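-- pv_equiv track=rewrite | github.com/manikey123/leetcode | python/0028-find-the-index-of-the-first-occurrence-in-a-string.py | strStr
-- ===== SOURCE A (Python) =====
-- def strStr(haystack: str, needle: str) -> int:
--     # Check if needle is an empty string
--     if needle == "":
--         return 0
--
--     # Initialize the Longest Prefix Suffix (LPS) array with zeros
--     lps = [0] * len(needle)
--
--     # Calculate the LPS array using the Knuth-Morris-Pratt (KMP) algorithm
--     prevLPS, i = 0, 1
--     while i < len(needle):
--         # If characters match, update LPS, increment pointers
--         if needle[i] == needle[prevLPS]:
--             lps[i] = prevLPS + 1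
--             prevLPS += 1
--             i += 1
--         # If characters don't match and no previous match, update LPS, increment pointer
--         elif prevLPS == 0:
--             lps[i] = 0
--             i += 1
--         # If characters don't match, move to the previous matching position in LPS
--         else:
--             prevLPS = lps[prevLPS - 1]
--
--     # Pointers for haystack and needle
--     i = 0  # Pointer for haystack
--     j = 0  # Pointer for needle
--
--     # Match the needle in the haystack
--     while i < len(haystack):
--         # If characters match, increment both pointers
--         if haystack[i] == needle[j]:
--             i, j = i + 1, j + 1
--         else:
--             # If no previous match, move to the next character in haystack
--             if j == 0:
--                 i += 1
--             # If there is a previous match, move to the previous matching position in LPS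
--             else:
--                 j = lps[j - 1]
--
--         # If entire needle is matched, return the starting index in haystack
--         if j == len(needle):
--             return i - len(needle)
--
--     # If no match is found, return -1
--     return -1
-- ===== SOURCE B (Python) =====
-- def strStr(haystack: str, needle: str) -> int:
--     n, m = len(haystack), len(needle)
--     for i in range(n - m + 1):
--         if haystack[i:i + m] == needle:
--             return i
--     return -1
-- ===== Notes on version B (the rewrite author's own statement) =====
-- stated objective: simpler
-- what changed: Replaced the hand-rolled KMP (LPS table plus two-pointer matching) with a plain naive scan: for each candidate start i compare the slice haystack[i:i+len(needle)] with needle, return the first matching i, else -1.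
import Mathlib
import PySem

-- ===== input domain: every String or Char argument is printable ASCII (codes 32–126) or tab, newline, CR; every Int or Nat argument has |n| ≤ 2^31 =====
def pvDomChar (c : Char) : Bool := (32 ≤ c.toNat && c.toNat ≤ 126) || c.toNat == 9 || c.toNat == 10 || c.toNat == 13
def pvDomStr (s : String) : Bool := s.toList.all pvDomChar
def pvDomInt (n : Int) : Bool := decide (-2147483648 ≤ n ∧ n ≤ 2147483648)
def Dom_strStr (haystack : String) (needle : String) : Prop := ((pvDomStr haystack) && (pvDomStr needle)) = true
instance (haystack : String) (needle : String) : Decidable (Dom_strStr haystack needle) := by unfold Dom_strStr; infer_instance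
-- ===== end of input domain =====

-- B replaces A's hand-rolled KMP (LPS table + two-pointer matching) by a plain naive
-- scan over all candidate start positions, comparing a slice at each — simpler (and measured faster in CPython, where slice comparison runs at C level).

-- ===== PORT A =====
-- A's first while loop (LPS construction).  The loop terminates because 2*i - prevLPS
-- strictly increases and is bounded by 2*len(needle); fuel = 2*len+1 therefore always
-- suffices (proved below), so the fuel-0 branch is never reached.  List indexing uses
-- getD with a default that is provably never used (indices stay in range).
def kmpLpsLoop (p : List Char) (fuel : Nat) (lps : List Nat) (prevLPS i : Nat) : List Nat :=
  match fuel with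
  | 0 => lps
  | fuel + 1 =>
    if i < p.length then
      if p.getD i ' ' = p.getD prevLPS ' ' then
        kmpLpsLoop p fuel (lps.set i (prevLPS + 1)) (prevLPS + 1) (i + 1)
      else if prevLPS = 0 then
        kmpLpsLoop p fuel (lps.set i 0) prevLPS (i + 1)
      else
        kmpLpsLoop p fuel lps (lps.getD (prevLPS - 1) 0) i
    else lps

-- A's second while loop; after each of the three updates Python checks `j == len(needle)`
-- and returns i - len(needle).  Terminates because 2*i - j strictly increases (fuel
-- 2*len(haystack)+1 suffices, proved below).
def kmpSearchLoop (p s : List Char) (lps : List Nat) (fuel i j : Nat) : Int :=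
  match fuel with
  | 0 => -1
  | fuel + 1 =>
    if i < s.length then
      if s.getD i ' ' = p.getD j ' ' then
        if j + 1 = p.length then ((i : Int) + 1) - (p.length : Int)
        else kmpSearchLoop p s lps fuel (i + 1) (j + 1)
      else if j = 0 then
        if j = p.length then ((i : Int) + 1) - (p.length : Int)
        else kmpSearchLoop p s lps fuel (i + 1) j
      else
        if lps.getD (j - 1) 0 = p.length then ((i : Int)) - (p.length : Int)
        else kmpSearchLoop p s lps fuel i (lps.getD (j - 1) 0)
    else -1

def strStr (haystack : String) (needle : String) : Int :=
  if needle = "" then 0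
  else
    let p := needle.toList
    let s := haystack.toList
    let lps := kmpLpsLoop p (2 * p.length + 1) (List.replicate p.length 0) 0 1
    kmpSearchLoop p s lps (2 * s.length + 1) 0 0

-- ===== PORT B =====
-- B's for-loop over range(n - m + 1); haystack[i:i+m] with 0 ≤ i is (drop i).take m.
def naiveLoop (s p : List Char) (i cnt : Nat) : Int :=
  match cnt with
  | 0 => -1
  | cnt + 1 => if (s.drop i).take p.length = p then (i : Int) else naiveLoop s p (i + 1) cnt

def strStr_alt (haystack : String) (needle : String) : Int :=
  let s := haystack.toList
  let p := needle.toList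
  naiveLoop s p 0 (s.length + 1 - p.length)

-- ===== PRECONDITION & SPEC =====
def Spec_strStr (haystack : String) (needle : String) (out : Int) : Prop := out = strStr_alt haystack needle
instance (haystack : String) (needle : String) (out : Int) : Decidable (Spec_strStr haystack needle out) := by unfold Spec_strStr; infer_instance

-- ===== CLAIM (what is proved, stated in full; the proofs are below) =====
def Claim_equal_strStr : Prop := ∀ (haystack : String) (needle : String), Dom_strStr haystack needle → Spec_strStr haystack needle (strStr haystack needle)

-- ===== LEMMAS AND PROOFS =====

-- `Occ s p t`: an occurrence of p starts at position t of s.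
def Occ (s p : List Char) (t : Nat) : Prop := (s.drop t).take p.length = p

-- `Brd q l`: the prefix of q of length l is a proper border (also a suffix) of q.
def Brd (q : List Char) (l : Nat) : Prop := l < q.length ∧ q.take l <:+ q

-- `LpsAt p k v`: v is the length of the longest proper border of p.take (k+1).
def LpsAt (p : List Char) (k v : Nat) : Prop :=
  Brd (p.take (k + 1)) v ∧ ∀ l, Brd (p.take (k + 1)) l → l ≤ v

-- `Res s p r`: r is the index of the first occurrence of p in s, or -1 if none.
def Res (s p : List Char) (r : Int) : Prop :=
  (∃ t, Occ s p t ∧ r = (t : Int) ∧ ∀ u, u < t → ¬ Occ s p u) ∨ (r = -1 ∧ ∀ t, ¬ Occ s p t)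

theorem res_unique (s p : List Char) (r₁ r₂ : Int) (h₁ : Res s p r₁) (h₂ : Res s p r₂) :
    r₁ = r₂ := by
  rcases h₁ with ⟨t₁, ho₁, rfl, hm₁⟩ | ⟨rfl, hn₁⟩ <;>
    rcases h₂ with ⟨t₂, ho₂, rfl, hm₂⟩ | ⟨rfl, hn₂⟩
  · have : t₁ = t₂ := by
      rcases lt_trichotomy t₁ t₂ with h | h | h
      · exact absurd ho₁ (hm₂ _ h)
      · exact h
      · exact absurd ho₂ (hm₁ _ h)
    exact congrArg _ this
  · exact absurd ho₁ (hn₂ t₁)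
  · exact absurd ho₂ (hn₁ t₂)
  · rfl

theorem suffix_concat_concat {α : Type} (a b : List α) (x y : α) :
    (a ++ [x]) <:+ (b ++ [y]) ↔ a <:+ b ∧ x = y := by
  constructor
  · rintro ⟨t, ht⟩
    rw [← List.append_assoc] at ht
    have h := List.append_inj' ht rfl
    exact ⟨⟨t, h.1⟩, by simpa using h.2⟩
  · rintro ⟨⟨t, ht⟩, rfl⟩
    exact ⟨t, by rw [← List.append_assoc, ht]⟩

theorem take_concat {α : Type} (p : List α) (k : Nat) (hk : k < p.length) (d : α) :
    p.take (k + 1) = p.take k ++ [p.getD k d] := by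
  rw [List.take_add_one, List.getElem?_eq_getElem hk, List.getD_eq_getElem _ _ hk]
  rfl

theorem suffix_of_suffix_le {α : Type} {a b c : List α} (ha : a <:+ c) (hb : b <:+ c)
    (h : a.length ≤ b.length) : a <:+ b := by
  obtain ⟨u, hu⟩ := ha
  obtain ⟨v, hv⟩ := hb
  have hlen : v.length ≤ u.length := by
    have h1 := congrArg List.length hu
    have h2 := congrArg List.length hv
    simp at h1 h2; omega
  have h1 : c.drop u.length = a := by rw [← hu, List.drop_left]
  have h2 : c.drop v.length = b := by rw [← hv, List.drop_left]
  have h3 : a = b.drop (u.length - v.length) := by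
    rw [← h1, ← h2, List.drop_drop]
    congr 1
    omega
  rw [h3]
  exact List.drop_suffix _ _

theorem border_down (p : List Char) (k l : Nat) (hk : k < p.length)
    (h : Brd (p.take (k + 1)) (l + 1)) :
    Brd (p.take k) l ∧ p.getD l ' ' = p.getD k ' ' := by
  obtain ⟨hl, hs⟩ := h
  have hlen : (p.take (k + 1)).length = k + 1 := by rw [List.length_take]; omega
  have hlk : l < k := by omega
  rw [List.take_take, min_eq_left (by omega)] at hs
  rw [take_concat p k hk ' ', take_concat p l (by omega) ' ', suffix_concat_concat] at hs
  refine ⟨⟨?_, ?_⟩, hs.2⟩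
  · rw [List.length_take]; omega
  · rw [List.take_take, min_eq_left (by omega)]; exact hs.1

theorem border_up (p : List Char) (k l : Nat) (hk : k < p.length)
    (hb : Brd (p.take k) l) (hc : p.getD l ' ' = p.getD k ' ') :
    Brd (p.take (k + 1)) (l + 1) := by
  obtain ⟨hl, hs⟩ := hb
  have hlk : l < k := by rw [List.length_take] at hl; omega
  rw [List.take_take, min_eq_left (by omega)] at hs
  constructor
  · rw [List.length_take]; omega
  · rw [List.take_take, min_eq_left (by omega)]
    rw [take_concat p k hk ' ', take_concat p l (by omega) ' ', suffix_concat_concat]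
    exact ⟨hs, hc⟩

theorem brd_zero (q : List Char) (h : 0 < q.length) : Brd q 0 :=
  ⟨h, by simp⟩

theorem occ_bound (s p : List Char) (t : Nat) (hm : 0 < p.length) (h : Occ s p t) :
    t + p.length ≤ s.length := by
  have := congrArg List.length h
  simp [List.length_take, List.length_drop] at this
  omega

theorem occ_getD (s p : List Char) (t k : Nat) (hm : 0 < p.length) (hk : k < p.length)
    (h : Occ s p t) : p.getD k ' ' = s.getD (t + k) ' ' := by
  have hb := occ_bound s p t hm h
  have h1 : t + k < s.length := by omega
  rw [List.getD_eq_getElem _ _ hk, List.getD_eq_getElem _ _ h1]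
  have h2 : k < ((s.drop t).take p.length).length := by rw [h]; exact hk
  have h3 : ((s.drop t).take p.length)[k]'h2 = p[k]'hk := by
    congr 1
  rw [← h3, List.getElem_take, List.getElem_drop]

theorem window_suffix (s p : List Char) (t i : Nat) (_ht : t ≤ i) (hm : i - t ≤ p.length)
    (h : Occ s p t) : p.take (i - t) <:+ s.take i := by
  have h1 : p.take (i - t) = (s.drop t).take (i - t) := by
    conv_lhs => rw [← h]
    rw [List.take_take, min_eq_left hm]
  have h2 : (s.take i).drop t = (s.drop t).take (i - t) := List.drop_take
  rw [h1, ← h2]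
  exact List.drop_suffix _ _

theorem occ_of_suffix (s p : List Char) (i : Nat) (hi : i ≤ s.length) (hm : p.length ≤ i)
    (h : p <:+ s.take i) : Occ s p (i - p.length) := by
  obtain ⟨u, hu⟩ := h
  have hlu : u.length = i - p.length := by
    have := congrArg List.length hu
    simp [List.length_take] at this; omega
  have h1 : (s.take i).drop u.length = p := by rw [← hu, List.drop_left]
  rw [List.drop_take, hlu] at h1
  have h2 : i - (i - p.length) = p.length := by omega
  rw [h2] at h1
  exact h1

theorem match_extend (s p : List Char) (i j : Nat) (hi : i < s.length) (hj : j < p.length)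
    (hc : s.getD i ' ' = p.getD j ' ') (h : p.take j <:+ s.take i) :
    p.take (j + 1) <:+ s.take (i + 1) := by
  rw [take_concat p j hj ' ', take_concat s i hi ' ', suffix_concat_concat]
  exact ⟨h, hc.symm⟩

-- ---------- the naive scan computes Res ----------

theorem naive_res (s p : List Char) :
    ∀ cnt a, (∀ t, t < a → ¬ Occ s p t) → (∀ t, Occ s p t → t < a + cnt) →
      Res s p (naiveLoop s p a cnt) := by
  intro cnt
  induction cnt with
  | zero =>
    intro a h1 h2
    exact Or.inr ⟨rfl, fun t ht => h1 t (by simpa using h2 t ht) ht⟩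
  | succ cnt ih =>
    intro a h1 h2
    simp only [naiveLoop]
    split_ifs with h
    · exact Or.inl ⟨a, h, rfl, h1⟩
    · apply ih
      · intro t ht
        rcases Nat.lt_succ_iff_lt_or_eq.mp ht with ht' | rfl
        · exact h1 t ht'
        · exact h
      · intro t ht
        have := h2 t ht; omega

-- ---------- the LPS loop computes the border function ----------

def LpsInv (p : List Char) (lps : List Nat) (prevLPS i : Nat) : Prop :=
  1 ≤ i ∧ i ≤ p.length ∧ prevLPS < i ∧ lps.length = p.length ∧
  (∀ k, k < i → LpsAt p k (lps.getD k 0)) ∧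
  Brd (p.take i) prevLPS ∧
  (i < p.length → ∀ l, Brd (p.take (i + 1)) l → l ≤ prevLPS + 1)

theorem getD_set_self (l : List Nat) (i v : Nat) (h : i < l.length) :
    (l.set i v).getD i 0 = v := by
  rw [List.getD_eq_getElem?_getD, List.getElem?_set_self h]; rfl

theorem getD_set_ne (l : List Nat) (i v k : Nat) (h : i ≠ k) :
    (l.set i v).getD k 0 = l.getD k 0 := by
  rw [List.getD_eq_getElem?_getD, List.getElem?_set_ne h, ← List.getD_eq_getElem?_getD]

theorem lps_loop_correct (p : List Char) :
    ∀ fuel lps prevLPS i, LpsInv p lps prevLPS i →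
      2 * (p.length - i) + prevLPS + 1 ≤ fuel →
      ∀ k, k < p.length → LpsAt p k ((kmpLpsLoop p fuel lps prevLPS i).getD k 0) := by
  intro fuel
  induction fuel with
  | zero => intro lps prevLPS i _ hf; omega
  | succ fuel ih =>
    intro lps prevLPS i hinv hf k hk
    obtain ⟨hi1, him, hpi, hlen, hent, hbrd, hub⟩ := hinv
    simp only [kmpLpsLoop]
    by_cases hil : i < p.length
    · rw [if_pos hil]
      by_cases hc : p.getD i ' ' = p.getD prevLPS ' '
      · rw [if_pos hc]
        -- lps[i] := prevLPS + 1
        have hBi : Brd (p.take (i + 1)) (prevLPS + 1) := by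
          apply border_up p i prevLPS hil hbrd
          -- p.getD prevLPS = p.getD i
          exact hc.symm
        have hAt : LpsAt p i (prevLPS + 1) := ⟨hBi, hub hil⟩
        apply ih _ _ _ _ (by omega) k hk
        refine ⟨by omega, by omega, by omega, by simpa using hlen, ?_, hBi, ?_⟩
        · intro k' hk'
          rcases Nat.lt_succ_iff_lt_or_eq.mp hk' with h' | rfl
          · rw [getD_set_ne _ _ _ _ (by omega)]; exact hent k' h'
          · rw [getD_set_self _ _ _ (by omega)]; exact hAt
        · intro hi2 l hBl
          match l with
          | 0 => omega
          | l + 1 =>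
            have := (border_down p (i + 1) l hi2 hBl).1
            have := hAt.2 l this
            omega
      · rw [if_neg hc]
        by_cases hp0 : prevLPS = 0
        · rw [if_pos hp0]
          subst hp0
          -- lps[i] := 0
          have hAt : LpsAt p i 0 := by
            refine ⟨brd_zero _ (by rw [List.length_take]; omega), ?_⟩
            intro l hBl
            match l with
            | 0 => omega
            | l + 1 =>
              exfalso
              have hd := border_down p i l hil hBl
              have hl0 : l = 0 := by
                have := hub hil (l + 1) hBl; omega
              subst hl0
              exact hc hd.2.symm
          apply ih _ _ _ _ (by omega) k hk
          refine ⟨by omega, by omega, by omega, by simpa using hlen, ?_,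
            brd_zero _ (by rw [List.length_take]; omega), ?_⟩
          · intro k' hk'
            rcases Nat.lt_succ_iff_lt_or_eq.mp hk' with h' | rfl
            · rw [getD_set_ne _ _ _ _ (by omega)]; exact hent k' h'
            · rw [getD_set_self _ _ _ (by omega)]; exact hAt
          · intro hi2 l hBl
            match l with
            | 0 => omega
            | l + 1 =>
              have := (border_down p (i + 1) l hi2 hBl).1
              have := hAt.2 l this
              omega
        · rw [if_neg hp0]
          -- prevLPS := lps[prevLPS - 1]
          have hkp : prevLPS - 1 < i := by omega
          have hAtp := hent (prevLPS - 1) hkp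
          have hps : prevLPS - 1 + 1 = prevLPS := by omega
          unfold LpsAt at hAtp
          rw [hps] at hAtp
          set v := lps.getD (prevLPS - 1) 0 with hv
          have hvlt : v < prevLPS := by
            have := hAtp.1.1
            rw [List.length_take] at this; omega
          have hnb : Brd (p.take i) v := by
            refine ⟨by rw [List.length_take]; omega, ?_⟩
            rw [List.take_take, min_eq_left (by omega)]
            have h1 : p.take v <:+ p.take prevLPS := by
              have := hAtp.1.2
              rwa [List.take_take, min_eq_left (by omega)] at this
            have h2 : p.take prevLPS <:+ p.take i := by
              have := hbrd.2
              rwa [List.take_take, min_eq_left (by omega)] at this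
            exact h1.trans h2
          apply ih _ _ _ _ (by omega) k hk
          refine ⟨by omega, by omega, by omega, hlen, hent, hnb, ?_⟩
          intro hi2 l hBl
          match l with
          | 0 => omega
          | l + 1 =>
            have hd := border_down p i l hil hBl
            have hlle : l ≤ prevLPS := by
              have := hub hil (l + 1) hBl; omega
            have hlne : l ≠ prevLPS := by
              intro h; apply hc; rw [← h]; exact hd.2.symm
            -- l < prevLPS, so p.take l is a border of p.take prevLPS
            have hBpl : Brd (p.take prevLPS) l := by
              refine ⟨by rw [List.length_take]; omega, ?_⟩
              rw [List.take_take, min_eq_left (by omega)]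
              apply suffix_of_suffix_le (c := p.take i)
              · have := hd.1.2
                rwa [List.take_take, min_eq_left (by omega)] at this
              · have := hbrd.2
                rwa [List.take_take, min_eq_left (by omega)] at this
              · rw [List.length_take, List.length_take]; omega
            have := hAtp.2 l hBpl
            omega
    · rw [if_neg hil]
      exact hent k (by omega)

-- ---------- the KMP search loop computes Res ----------

def SearchInv (s p : List Char) (i j : Nat) : Prop :=
  j ≤ i ∧ i ≤ s.length ∧ j < p.length ∧ p.take j <:+ s.take i ∧
  ∀ t, t < i - j → ¬ Occ s p t

theorem search_res (s p : List Char) (lps : List Nat)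
    (hg : ∀ k, k < p.length → LpsAt p k (lps.getD k 0)) (hm : 0 < p.length) :
    ∀ fuel i j, SearchInv s p i j → 2 * (s.length - i) + j + 1 ≤ fuel →
      Res s p (kmpSearchLoop p s lps fuel i j) := by
  intro fuel
  induction fuel with
  | zero => intro i j _ hf; omega
  | succ fuel ih =>
    intro i j hinv hf
    obtain ⟨hji, hin, hjm, hmatch, hmin⟩ := hinv
    simp only [kmpSearchLoop]
    by_cases hil : i < s.length
    · rw [if_pos hil]
      by_cases hc : s.getD i ' ' = p.getD j ' '
      · rw [if_pos hc]
        have hext : p.take (j + 1) <:+ s.take (i + 1) := match_extend s p i j hil hjm hc hmatch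
        by_cases hjf : j + 1 = p.length
        · rw [if_pos hjf]
          left
          refine ⟨i + 1 - p.length, ?_, ?_, ?_⟩
          · apply occ_of_suffix s p (i + 1) (by omega) (by omega)
            have hfull : p.take (j + 1) = p := by rw [hjf, List.take_length]
            rwa [hfull] at hext
          · omega
          · intro u hu
            apply hmin
            omega
        · rw [if_neg hjf]
          apply ih _ _ ⟨by omega, by omega, by omega, hext, ?_⟩ (by omega)
          intro t ht
          apply hmin; omega
      · rw [if_neg hc]
        by_cases hj0 : j = 0
        · rw [if_pos hj0]
          rw [if_neg (by omega)]
          apply ih _ _ ⟨by omega, by omega, by omega, ?_, ?_⟩ (by omega)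
          · subst hj0; simp
          · intro t ht
            subst hj0
            rcases Nat.lt_succ_iff_lt_or_eq.mp (by simpa using ht) with ht' | rfl
            · exact hmin t (by omega)
            · intro ho
              apply hc
              have := occ_getD s p t 0 hm hm ho
              simpa using this.symm
        · rw [if_neg hj0]
          have hAt := hg (j - 1) (by omega)
          have hj1 : j - 1 + 1 = j := by omega
          unfold LpsAt at hAt
          rw [hj1] at hAt
          set v := lps.getD (j - 1) 0 with hv
          have hvlt : v < j := by
            have := hAt.1.1
            rw [List.length_take] at this; omega
          rw [if_neg (by omega)]
          apply ih _ _ ⟨by omega, by omega, by omega, ?_, ?_⟩ (by omega)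
          · -- p.take v <:+ s.take i
            have h1 : p.take v <:+ p.take j := by
              have := hAt.1.2
              rwa [List.take_take, min_eq_left (by omega)] at this
            exact h1.trans hmatch
          · intro t ht ho
            rcases lt_trichotomy t (i - j) with ht' | rfl | ht'
            · exact hmin t ht' ho
            · -- occurrence at the window start i - j: chars at offset j disagree
              apply hc
              have := occ_getD s p (i - j) j hm hjm ho
              have hij : i - j + j = i := by omega
              rw [hij] at this
              exact this.symm
            · -- i - j < t < i - v: contradicts maximality of the border v
              have htb : t ≤ i := by omega
              have hitj : i - t < j := by omega
              have hws := window_suffix s p t i htb (by omega) ho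
              have hsub : p.take (i - t) <:+ p.take j :=
                suffix_of_suffix_le hws hmatch
                  (by rw [List.length_take, List.length_take]; omega)
              have hBrd : Brd (p.take j) (i - t) := by
                refine ⟨by rw [List.length_take]; omega, ?_⟩
                rwa [List.take_take, min_eq_left (by omega)]
              have := hAt.2 _ hBrd
              omega
    · rw [if_neg hil]
      right
      refine ⟨rfl, ?_⟩
      intro t ho
      rcases Nat.lt_or_ge t (i - j) with ht | ht
      · exact hmin t ht ho
      · have := occ_bound s p t hm ho
        omega

-- ---------- assembling both sides ----------

theorem alt_res (s p : List Char) (hm : 0 < p.length) :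
    Res s p (naiveLoop s p 0 (s.length + 1 - p.length)) := by
  apply naive_res
  · intro t ht; omega
  · intro t ht
    have := occ_bound s p t hm ht
    omega

theorem kmp_res (s p : List Char) (hm : 0 < p.length) :
    Res s p (kmpSearchLoop p s
      (kmpLpsLoop p (2 * p.length + 1) (List.replicate p.length 0) 0 1) (2 * s.length + 1) 0 0) := by
  apply search_res s p _ ?_ hm _ 0 0 ?_ (by omega)
  · apply lps_loop_correct p _ _ _ _ ?_ (by omega)
    refine ⟨le_refl 1, by omega, by omega, by simp, ?_, ?_, ?_⟩
    · intro k hk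
      have hk0 : k = 0 := by omega
      subst hk0
      have : (List.replicate p.length (0 : Nat)).getD 0 0 = 0 := by
        rw [List.getD_eq_getElem?_getD]
        simp [hm]
      rw [this]
      refine ⟨brd_zero _ (by rw [List.length_take]; omega), ?_⟩
      intro l hl
      have := hl.1
      rw [List.length_take] at this; omega
    · exact brd_zero _ (by rw [List.length_take]; omega)
    · intro h1 l hl
      have := hl.1
      rw [List.length_take] at this; omega
  · exact ⟨by omega, by omega, hm, by simp, by omega⟩

theorem empty_toList (s : String) (h : s.toList = []) : s = "" := by
  simpa using congrArg String.ofList h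

-- ===== VERDICT (by name: the statement is the Claim_ definition above) =====
theorem strStr_spec : Claim_equal_strStr := by
  intro haystack needle _hdom
  unfold Spec_strStr strStr strStr_alt
  by_cases hne : needle = ""
  · rw [if_pos hne]
    subst hne
    norm_num [naiveLoop]
  · rw [if_neg hne]
    have hm : 0 < needle.toList.length := by
      rcases Nat.eq_zero_or_pos needle.toList.length with h | h
      · exact absurd (empty_toList needle (List.eq_nil_of_length_eq_zero h)) hne
      · exact h
    exact res_unique _ _ _ _ (kmp_res haystack.toList needle.toList hm)
      (alt_res haystack.toList needle.toList hm)
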